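-- pv_equiv track=rewrite | github.com/profjuri/chemDM | binary_tests/binary_loader.py | binary_to_smiles
-- ===== SOURCE A (Python) =====
-- def binary_to_smiles(binary_rep, character_list):
--
-- # Your list with binary-letter components
--     binary_letter_list = character_list
--
-- # Create a dictionary from the list for easy lookup
--     binary_to_letter = {binary: letter for letter, binary in binary_letter_list}
--
-- # Function to replace binary strings with letters
--     def replace_binary_with_letters(binary_string):
--         result = ''
--         i = 0
--         while i < len(binary_string):
--             found = False
--             for binary, letter in binary_to_letter.items():
--                 if binary_string.startswith(binary, i):
--                     result += letter
--                     i += len(binary)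
--                     found = True
--                     break
--             if not found:
--                 # If no match is found, add the original substring to the result
--                 result += binary_string[i]
--                 i += 1
--         return result
--
--     # Example list of binary strings
--     binary_list = binary_rep
--
--     # Replace binary strings with letters in each entry
--     result_letters = [replace_binary_with_letters(binary_string) for binary_string in binary_list]
--
--     return result_letters
-- ===== SOURCE B (Python) =====
-- def binary_to_smiles(binary_rep, character_list):
--     # Bucket the codes by length: build the code->letter map once, give each code its
--     # insertion rank, and per position try only the distinct code lengths, keeping the
--     # match of minimal rank (= the first match of A's inner dict scan).
--     code_letter = {}
--     for letter, binary in character_list: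
--         code_letter[binary] = letter
--     rank = {code: r for r, code in enumerate(code_letter)}
--     lengths = sorted({len(code) for code in code_letter})
--     out = []
--     for s in binary_rep:
--         pieces = []
--         i = 0
--         n = len(s)
--         while i < n:
--             best = None
--             for L in lengths:
--                 cand = s[i:i + L]
--                 r = rank.get(cand)
--                 if r is not None and (best is None or r < best[0]):
--                     best = (r, cand)
--             if best is None:
--                 pieces.append(s[i])
--                 i += 1
--             else:
--                 code = best[1]
--                 pieces.append(code_letter[code])
--                 i += len(code)
--         out.append(''.join(pieces))
--     return out
-- ===== Notes on version B (the rewrite author's own statement) =====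
-- stated objective: faster
-- what changed: Instead of scanning the whole code dictionary with startswith at every position, B precomputes a code->letter map, a code->insertion-rank map and the sorted set of distinct code lengths, and at each position hashes only the K distinct-length substrings, keeping the candidate of minimal rank (= A's first dict-order match).
import Mathlib
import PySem

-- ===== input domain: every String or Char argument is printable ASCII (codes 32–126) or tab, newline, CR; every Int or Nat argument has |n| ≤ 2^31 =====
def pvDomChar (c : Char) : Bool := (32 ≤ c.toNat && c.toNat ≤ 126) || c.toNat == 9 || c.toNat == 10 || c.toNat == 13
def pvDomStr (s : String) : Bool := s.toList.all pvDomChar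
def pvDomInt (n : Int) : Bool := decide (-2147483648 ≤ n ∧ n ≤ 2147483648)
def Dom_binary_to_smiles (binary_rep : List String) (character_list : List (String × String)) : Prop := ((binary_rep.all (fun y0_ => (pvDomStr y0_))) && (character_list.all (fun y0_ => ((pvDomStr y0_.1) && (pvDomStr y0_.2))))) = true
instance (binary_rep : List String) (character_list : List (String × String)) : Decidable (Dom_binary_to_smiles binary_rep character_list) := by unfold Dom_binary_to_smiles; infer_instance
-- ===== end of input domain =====

-- B replaces A's per-position scan of the whole code dictionary (startswith for every
-- code) by hashing only the distinct-length substrings at each position and keeping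
-- the candidate of minimal insertion rank; a timing run measures whether this is faster.


-- ===== PORT A =====
-- A's inner while loop, recursing on the remaining suffix of the string; fuel = remaining
-- length (each Python iteration consumes ≥ 1 character whenever no code is empty).
-- `binary_string.startswith(binary, i)` for 0 ≤ i ≤ len is exactly isPrefixOf on the suffix,
-- and the `for … break` over dict items is List.find? over the items list: both exact.
def pvReplA (items : List (String × String)) : Nat → List Char → List Char
  | 0, _ => []
  | _ + 1, [] => []
  | fuel + 1, c :: rs =>
    match items.find? (fun p => p.1.toList.isPrefixOf (c :: rs)) with
    | some q => q.2.toList ++ pvReplA items fuel ((c :: rs).drop q.1.toList.length)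
    | none => c :: pvReplA items fuel rs

def binary_to_smiles (binary_rep : List String) (character_list : List (String × String)) : List String :=
  let binary_to_letter : PySem.Dict String String :=
    character_list.foldl (fun d p => d.insert p.2 p.1) PySem.Dict.empty
  binary_rep.map (fun s => String.ofList (pvReplA binary_to_letter.items s.toList.length s.toList))

-- ===== PORT B =====
def pvRankOf (ks : List String) : PySem.Dict String Int :=
  (PySem.List.enumerate ks).foldl (fun d p => d.insert p.2 p.1) PySem.Dict.empty

def pvLengthsOf (ks : List String) : List Nat :=
  PySem.List.sorted (PySem.List.dedup (ks.map (fun k => k.toList.length))) id false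

-- the inner `for L in lengths` body keeping the minimal-rank candidate
def pvBestStep (rank : PySem.Dict String Int) (rest : List Char)
    (best : Option (Int × String)) (L : Nat) : Option (Int × String) :=
  let cand := String.ofList (rest.take L)
  match rank.get? cand with
  | some r =>
    match best with
    | none => some (r, cand)
    | some b => if r < b.1 then some (r, cand) else best
  | none => best

def pvBest (rank : PySem.Dict String Int) (lengths : List Nat) (rest : List Char) :
    Option (Int × String) :=
  lengths.foldl (pvBestStep rank rest) none

-- B's while loop; the `pieces` list joined by ''.join is built here as the direct
-- concatenation of the same pieces (exact). code_letter[code] is ported as getD with an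
-- unreachable default: the chosen code is always a key of code_letter.
def pvReplB (cl : PySem.Dict String String) (rank : PySem.Dict String Int)
    (lengths : List Nat) : Nat → List Char → List Char
  | 0, _ => []
  | _ + 1, [] => []
  | fuel + 1, c :: rs =>
    match pvBest rank lengths (c :: rs) with
    | none => c :: pvReplB cl rank lengths fuel rs
    | some b => (cl.getD b.2 "").toList ++ pvReplB cl rank lengths fuel ((c :: rs).drop b.2.toList.length)

def binary_to_smiles_alt (binary_rep : List String) (character_list : List (String × String)) : List String :=
  let code_letter : PySem.Dict String String :=
    character_list.foldl (fun d p => d.insert p.2 p.1) PySem.Dict.empty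
  let rank := pvRankOf code_letter.keys
  let lengths := pvLengthsOf code_letter.keys
  binary_rep.foldl
    (fun out s => out ++ [String.ofList (pvReplB code_letter rank lengths s.toList.length s.toList)]) []

-- ===== PRECONDITION & SPEC =====
-- No Pre_: on character lists containing an empty binary code both Pythons can loop
-- forever (they then return nothing, so nothing is claimed there); wherever either
-- Python returns, the fuel-bounded ports compute that value, and they agree everywhere.
def Spec_binary_to_smiles (binary_rep : List String) (character_list : List (String × String)) (out : List String) : Prop := out = binary_to_smiles_alt binary_rep character_list
instance (binary_rep : List String) (character_list : List (String × String)) (out : List String) : Decidable (Spec_binary_to_smiles binary_rep character_list out) := by unfold Spec_binary_to_smiles; infer_instance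

-- ===== CLAIM (what is proved, stated in full; the proofs are below) =====
def Claim_equal_binary_to_smiles : Prop := ∀ (binary_rep : List String) (character_list : List (String × String)), Dom_binary_to_smiles binary_rep character_list → Spec_binary_to_smiles binary_rep character_list (binary_to_smiles binary_rep character_list)

-- ===== LEMMAS AND PROOFS =====

-- keys of the dict built by the fold are Nodup
theorem pv_nodup_keys (character_list : List (String × String)) :
    (character_list.foldl (fun d p => d.insert p.2 p.1) (PySem.Dict.empty : PySem.Dict String String)).keys.Nodup := by
  have := PySem.Dict.nodup_keys_foldl_insert_key character_list (fun p => p.2)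
      (fun _ p => p.1) (PySem.Dict.empty : PySem.Dict String String)
      (by simp)
  simpa using this

theorem pv_rank_items (ks : List String) (h : ks.Nodup) :
    (pvRankOf ks).items = (PySem.List.enumerate ks).map (fun p => (p.2, p.1)) := by
  unfold pvRankOf
  have := PySem.Dict.items_foldl_insert_fresh (PySem.List.enumerate ks) (fun p => p.2)
      (fun p => p.1) (PySem.Dict.empty : PySem.Dict String Int)
      (by intro a _; simp [PySem.Dict.contains_empty])
      (by rw [PySem.List.map_snd_enumerate]; exact h)
  simpa using this

theorem pv_rank_keys (ks : List String) (h : ks.Nodup) : (pvRankOf ks).keys = ks := by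
  have hi := pv_rank_items ks h
  have : (pvRankOf ks).keys = (pvRankOf ks).items.map (fun p => p.1) := by
    simp [PySem.Dict.keys]
  rw [this, hi, List.map_map]
  show List.map (fun p => p.2) (PySem.List.enumerate ks) = ks
  exact PySem.List.map_snd_enumerate ks 0

theorem pv_rank_get (ks : List String) (h : ks.Nodup) (k : String) (r : Int) :
    (pvRankOf ks).get? k = some r ↔ ∃ (j : Nat) (_ : j < ks.length), r = (j : Int) ∧ k = ks[j] := by
  have hk : (pvRankOf ks).keys.Nodup := by rw [pv_rank_keys ks h]; exact h
  rw [PySem.Dict.get?_eq_some_iff_mem_items _ _ _ hk, pv_rank_items ks h]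
  simp only [List.mem_map, PySem.List.mem_enumerate_iff]
  constructor
  · rintro ⟨p, ⟨j, hj, hp⟩, he⟩
    subst hp
    simp only [Prod.mk.injEq] at he
    exact ⟨j, hj, by omega, he.1.symm⟩
  · rintro ⟨j, hj, hr, hkk⟩
    exact ⟨((0 : Int) + (j : Int), ks[j]), ⟨j, hj, rfl⟩, by simp [hr, hkk]⟩

theorem pv_mem_lengths (ks : List String) (L : Nat) :
    L ∈ pvLengthsOf ks ↔ ∃ k ∈ ks, k.toList.length = L := by
  unfold pvLengthsOf
  rw [PySem.List.mem_sorted, PySem.List.mem_dedup]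
  simp

theorem pv_best_step_none (rank : PySem.Dict String Int) (rest : List Char)
    (acc : Option (Int × String)) (L : Nat) (h : pvBestStep rank rest acc L = none) :
    acc = none ∧ rank.get? (String.ofList (rest.take L)) = none := by
  unfold pvBestStep at h
  cases hg : rank.get? (String.ofList (rest.take L)) <;> simp only [hg] at h
  · exact ⟨h, rfl⟩
  · cases acc with
    | none => simp at h
    | some b => simp only [] at h; split_ifs at h

theorem pv_best_go (rank : PySem.Dict String Int) (rest : List Char) (ls : List Nat) :
    ∀ (acc : Option (Int × String)),
    (ls.foldl (pvBestStep rank rest) acc = none →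
      acc = none ∧ ∀ L ∈ ls, rank.get? (String.ofList (rest.take L)) = none) ∧
    (∀ r c, ls.foldl (pvBestStep rank rest) acc = some (r, c) →
      ((acc = some (r, c)) ∨ ∃ L ∈ ls, rank.get? (String.ofList (rest.take L)) = some r ∧ c = String.ofList (rest.take L)) ∧
      (∀ L ∈ ls, ∀ r', rank.get? (String.ofList (rest.take L)) = some r' → r ≤ r') ∧
      (∀ r0 c0, acc = some (r0, c0) → r ≤ r0)) := by
  induction ls with
  | nil =>
    intro acc
    refine ⟨fun h => ⟨h, by simp⟩, fun r c h => ?_⟩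
    simp only [List.foldl_nil] at h
    refine ⟨Or.inl h, by simp, ?_⟩
    intro r0 c0 h0; rw [h] at h0; cases h0; rfl
  | cons L ls ih =>
    intro acc
    rcases ih (pvBestStep rank rest acc L) with ⟨ihn, ihs⟩
    constructor
    · intro h
      rcases ihn h with ⟨hacc, hall⟩
      rcases pv_best_step_none rank rest acc L hacc with ⟨ha, hg⟩
      refine ⟨ha, fun L' hL' => ?_⟩
      rcases List.mem_cons.mp hL' with h1 | h2
      · subst h1; exact hg
      · exact hall L' h2
    · intro r c h
      rcases ihs r c h with ⟨horig, hmin, hle⟩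
      cases hg : rank.get? (String.ofList (rest.take L)) with
      | none =>
        have hstep : pvBestStep rank rest acc L = acc := by unfold pvBestStep; simp [hg]
        refine ⟨?_, ?_, ?_⟩
        · rcases horig with h1 | ⟨L', hL', hh⟩
          · exact Or.inl (hstep ▸ h1)
          · exact Or.inr ⟨L', List.mem_cons_of_mem _ hL', hh⟩
        · intro L' hL' r' hr'
          rcases List.mem_cons.mp hL' with h1 | h2
          · subst h1; rw [hg] at hr'; cases hr'
          · exact hmin L' h2 r' hr'
        · intro r0 c0 h0; exact hle r0 c0 (by rw [hstep, h0])
      | some rL =>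
        cases hacc : acc with
        | none =>
          have hstep : pvBestStep rank rest acc L = some (rL, String.ofList (rest.take L)) := by
            unfold pvBestStep; simp [hg, hacc]
          refine ⟨?_, ?_, ?_⟩
          · rcases horig with h1 | ⟨L', hL', hh⟩
            · rw [hstep] at h1; cases h1
              exact Or.inr ⟨L, List.mem_cons_self, hg, rfl⟩
            · exact Or.inr ⟨L', List.mem_cons_of_mem _ hL', hh⟩
          · intro L' hL' r' hr'
            rcases List.mem_cons.mp hL' with h1 | h2
            · subst h1; rw [hg] at hr'; cases hr'
              exact hle rL _ hstep
            · exact hmin L' h2 r' hr'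
          · intro r0 c0 h0; cases h0
        | some b =>
          rcases b with ⟨r0, c0⟩
          by_cases hlt : rL < r0
          · have hstep : pvBestStep rank rest acc L = some (rL, String.ofList (rest.take L)) := by
              unfold pvBestStep; simp [hg, hacc, hlt]
            refine ⟨?_, ?_, ?_⟩
            · rcases horig with h1 | ⟨L', hL', hh⟩
              · rw [hstep] at h1; cases h1
                exact Or.inr ⟨L, List.mem_cons_self, hg, rfl⟩
              · exact Or.inr ⟨L', List.mem_cons_of_mem _ hL', hh⟩
            · intro L' hL' r' hr'
              rcases List.mem_cons.mp hL' with h1 | h2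
              · subst h1; rw [hg] at hr'; cases hr'
                exact hle rL _ hstep
              · exact hmin L' h2 r' hr'
            · intro r0' c0' h0; cases h0
              have := hle rL _ hstep; omega
          · have hstep : pvBestStep rank rest acc L = some (r0, c0) := by
              unfold pvBestStep; simp [hg, hacc, hlt]
            refine ⟨?_, ?_, ?_⟩
            · rcases horig with h1 | ⟨L', hL', hh⟩
              · rw [hstep] at h1; exact Or.inl h1
              · exact Or.inr ⟨L', List.mem_cons_of_mem _ hL', hh⟩
            · intro L' hL' r' hr'
              rcases List.mem_cons.mp hL' with h1 | h2
              · subst h1; rw [hg] at hr'; cases hr'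
                have := hle r0 c0 hstep; omega
              · exact hmin L' h2 r' hr'
            · intro r0' c0' h0; cases h0
              exact hle r0 c0 hstep

theorem pv_cand_of_prefix (k : String) (rest : List Char) (h : k.toList.isPrefixOf rest) :
    String.ofList (rest.take k.toList.length) = k := by
  have hp : k.toList <+: rest := List.isPrefixOf_iff_prefix.mp h
  rw [← List.prefix_iff_eq_take.mp hp, String.ofList_toList]

theorem pv_step (cl : PySem.Dict String String) (hnd : cl.keys.Nodup) (rest : List Char) :
    (cl.items.find? (fun p => p.1.toList.isPrefixOf rest) = none →
      pvBest (pvRankOf cl.keys) (pvLengthsOf cl.keys) rest = none) ∧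
    (∀ q, cl.items.find? (fun p => p.1.toList.isPrefixOf rest) = some q →
      ∃ r, pvBest (pvRankOf cl.keys) (pvLengthsOf cl.keys) rest = some (r, q.1) ∧
        cl.getD q.1 "" = q.2) := by
  have hkeys : cl.keys = cl.items.map (fun p => p.1) := by simp [PySem.Dict.keys]
  rcases pv_best_go (pvRankOf cl.keys) rest (pvLengthsOf cl.keys) none with ⟨gn, gs⟩
  constructor
  · -- no dict-order match ⇒ no candidate
    intro hf
    cases hb : pvBest (pvRankOf cl.keys) (pvLengthsOf cl.keys) rest with
    | none => rfl
    | some b =>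
      rcases b with ⟨r, c⟩
      rcases gs r c hb with ⟨horig, _, _⟩
      rcases horig with h1 | ⟨L, _, hgetL, hc⟩
      · cases h1
      · -- c is a key and a prefix of rest: contradicts find? = none
        rcases (pv_rank_get cl.keys hnd c r).mp (hc ▸ hgetL) with ⟨j, hj, _, hcj⟩
        have hmem : c ∈ cl.keys := hcj ▸ List.getElem_mem hj
        rw [hkeys] at hmem
        rcases List.mem_map.mp hmem with ⟨p, hp, hp1⟩
        have hpre : p.1.toList.isPrefixOf rest = true := by
          rw [hp1, hc]
          exact List.isPrefixOf_iff_prefix.mpr (by simpa using List.take_prefix L rest)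
        have := List.find?_eq_none.mp hf p hp
        simp [hpre] at this
  · -- a dict-order match q ⇒ pvBest returns q.1 with its rank
    intro q hf
    have hfind := List.find?_eq_some_iff_getElem.mp hf
    rcases hfind with ⟨hq, i, hi, hqi, hfirst⟩
    have hqmem : q ∈ cl.items := List.mem_of_find?_eq_some hf
    have hgd : cl.getD q.1 "" = q.2 := by
      have : (q.1, q.2) ∈ cl.items := by simpa using hqmem
      exact PySem.Dict.getD_of_mem_items cl this hnd ""
    -- q.1 = cl.keys[i]
    have hlen : cl.keys.length = cl.items.length := by rw [hkeys]; simp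
    have hik : i < cl.keys.length := by omega
    have hkeyi : cl.keys[i] = q.1 := by
      simp [hkeys, hqi]
    -- the slice at q.1's length is q.1 and has rank some i
    have hcand : String.ofList (rest.take q.1.toList.length) = q.1 := pv_cand_of_prefix _ _ hq
    have hLmem : q.1.toList.length ∈ pvLengthsOf cl.keys :=
      (pv_mem_lengths cl.keys _).mpr ⟨q.1, hkeyi ▸ List.getElem_mem hik, rfl⟩
    have hranki : (pvRankOf cl.keys).get? q.1 = some (i : Int) := by
      -- get? q.1 is some (it is a key), and pv_rank_get forces the index to be i by Nodup
      cases hg : (pvRankOf cl.keys).get? q.1 with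
      | none =>
        exfalso
        have := (PySem.Dict.get?_eq_none_iff_not_mem_keys _ _).mp hg
        rw [pv_rank_keys cl.keys hnd] at this
        exact this (hkeyi ▸ List.getElem_mem hik)
      | some r =>
        rcases (pv_rank_get cl.keys hnd q.1 r).mp hg with ⟨j, hj, hr, hqj⟩
        have : j = i := by
          have := (List.Nodup.getElem_inj_iff hnd).mp (hkeyi ▸ hqj.symm : cl.keys[j] = cl.keys[i])
          exact this
        subst this; rw [hr]
    -- pvBest is some
    cases hb : pvBest (pvRankOf cl.keys) (pvLengthsOf cl.keys) rest with
    | none =>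
      exfalso
      rcases gn hb with ⟨-, hall⟩
      have := hall _ hLmem
      rw [hcand, hranki] at this; cases this
    | some b =>
      rcases b with ⟨r, c⟩
      rcases gs r c hb with ⟨horig, hmin, -⟩
      rcases horig with h1 | ⟨L, hLm, hgetL, hc⟩
      · cases h1
      · -- c = keys[j] with r = j; show j = i
        rcases (pv_rank_get cl.keys hnd c r).mp (hc ▸ hgetL) with ⟨j, hj, hr, hcj⟩
        -- r ≤ i by minimality (the candidate at q.1's length has rank i)
        have hri : r ≤ (i : Int) := hmin _ hLmem _ (by rw [hcand]; exact hranki)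
        -- i ≤ j: keys[j] is a match, q is the first match
        have hprej : cl.keys[j].toList.isPrefixOf rest = true := by
          have hcl : c.toList <+: rest := by
            rw [hc]; simpa using List.take_prefix L rest
          rw [← hcj]
          exact List.isPrefixOf_iff_prefix.mpr hcl
        have hij : i ≤ j := by
          by_contra hc'
          have hlt : j < i := by omega
          have hjil : j < cl.items.length := by omega
          have := hfirst j hlt
          have hkj : cl.items[j].1 = cl.keys[j] := by simp [hkeys]
          rw [hkj, hprej] at this
          simp at this
        have : r = (i : Int) := by omega
        subst this
        have hji : j = i := by omega
        subst hji
        exact ⟨(j : Int), by rw [hcj, hkeyi], hgd⟩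


theorem pv_repl_eq (cl : PySem.Dict String String) (hnd : cl.keys.Nodup) :
    ∀ (fuel : Nat) (rest : List Char),
      pvReplA cl.items fuel rest = pvReplB cl (pvRankOf cl.keys) (pvLengthsOf cl.keys) fuel rest := by
  intro fuel
  induction fuel with
  | zero => intro rest; rfl
  | succ n ih =>
    intro rest
    cases rest with
    | nil => rfl
    | cons c rs =>
      rcases pv_step cl hnd (c :: rs) with ⟨hn, hs⟩
      cases hf : cl.items.find? (fun p => p.1.toList.isPrefixOf (c :: rs)) with
      | none =>
        simp [pvReplA, pvReplB, hf, hn hf, ih]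
      | some q =>
        rcases hs q hf with ⟨r, hb, hget⟩
        simp [pvReplA, pvReplB, hf, hb, hget, ih]

-- ===== VERDICT (by name: the statement is the Claim_ definition above) =====
theorem binary_to_smiles_spec : Claim_equal_binary_to_smiles := by
  intro binary_rep character_list _
  unfold Spec_binary_to_smiles binary_to_smiles binary_to_smiles_alt
  rw [PySem.List.foldl_append_singleton_eq_map]
  simp only [List.nil_append]
  apply List.map_congr_left
  intro s _
  rw [pv_repl_eq _ (pv_nodup_keys character_list)]
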